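-- pv_equiv track=rewrite | github.com/kechpaja/talktomein | backend.py | genpage
-- ===== SOURCE A (Python) =====
-- def mkrow(lang):
--     acc = "<tr class=\"" + lang[2] + "\"><td class=\"left-column\">"
--     acc += "&bigstar;" if lang[2] == "N" else ""
--     acc += "</td><td class=\"language\">" + lang[1] + "</td></tr>"
--     return acc
--
-- def genpage(user, query):
--     # Expect query to be a list of lists or tuples containing the
--     # language code, language, and level
--     acc = "<html>\n    <head>\n        <title>" + user + " speaks:</title>"
--     acc += '''
--         <meta name="viewport" content="width=device-width, initial-scale=1">
--         <lnk rel="stylesheet" type="text/css" href="../styles.css">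
--     </head>
--
--     <body>
--         <table>
-- '''
--
--     # TODO make more Pythonic?
--     blocks = []
--     for level in ["N", "C", "B", "A"]:
--         blocks.append("\n".join([mkrow(l) for l in query if l[2] == level]))
--     acc += "\n\n<tr class=\"border\"></td></td><td></td></tr>\n\n".join(blocks)
--
--     acc += '''
--         </table>
--
--         <p>Key: <span class="fluent">fluent</span>,
--         <span class="intermediate">intermediate</span>,
--         <span class="beginner">beginner</span>. Native
--         languages are starred (<span class="native">&bigstar;</span>).</p>
--
--     </body>
-- </html>
-- '''
--     return acc
-- ===== SOURCE B (Python) =====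
-- def mkrow(lang):
--     acc = "<tr class=\"" + lang[2] + "\"><td class=\"left-column\">"
--     acc += "&bigstar;" if lang[2] == "N" else ""
--     acc += "</td><td class=\"language\">" + lang[1] + "</td></tr>"
--     return acc
--
-- def genpage(user, query):
--     # One pass: group the rows by level into buckets, then emit the four
--     # blocks in the fixed N, C, B, A order (levels outside that list are
--     # simply never emitted, as in the original).
--     acc = "<html>\n    <head>\n        <title>" + user + " speaks:</title>"
--     acc += '''
--         <meta name="viewport" content="width=device-width, initial-scale=1">
--         <lnk rel="stylesheet" type="text/css" href="../styles.css">
--     </head>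
--
--     <body>
--         <table>
-- '''
--
--     buckets = {}
--     for l in query:
--         buckets.setdefault(l[2], []).append(l)
--
--     acc += "\n\n<tr class=\"border\"></td></td><td></td></tr>\n\n".join(
--         "\n".join(mkrow(l) for l in buckets.get(level, []))
--         for level in ["N", "C", "B", "A"])
--
--     acc += '''
--         </table>
--
--         <p>Key: <span class="fluent">fluent</span>,
--         <span class="intermediate">intermediate</span>,
--         <span class="beginner">beginner</span>. Native
--         languages are starred (<span class="native">&bigstar;</span>).</p>
--
--     </body>
-- </html>
-- '''
--     return acc
-- ===== Notes on version B (the rewrite author's own statement) =====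
-- stated objective: alternative
-- what changed: Replaces the four separate filtering scans over query (one per level) with a single grouping pass that buckets rows by level in a dict, then emits the four blocks in the fixed N,C,B,A order.
import Mathlib
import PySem

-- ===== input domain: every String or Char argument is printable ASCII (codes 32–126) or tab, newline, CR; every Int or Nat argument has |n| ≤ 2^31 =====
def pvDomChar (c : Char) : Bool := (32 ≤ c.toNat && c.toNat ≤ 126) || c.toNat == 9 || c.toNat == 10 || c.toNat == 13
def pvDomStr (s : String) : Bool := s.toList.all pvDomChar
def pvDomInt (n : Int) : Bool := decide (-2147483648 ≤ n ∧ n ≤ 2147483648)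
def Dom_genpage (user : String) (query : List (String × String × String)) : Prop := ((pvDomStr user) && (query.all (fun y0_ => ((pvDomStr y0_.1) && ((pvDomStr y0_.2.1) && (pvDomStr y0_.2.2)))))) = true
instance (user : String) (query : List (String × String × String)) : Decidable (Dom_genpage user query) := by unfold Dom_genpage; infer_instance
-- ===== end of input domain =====

-- ===== PORT A =====
-- B groups the rows by level in one pass instead of A's four filtering scans; same output (alternative decomposition).
def mkrow (lang : String × String × String) : String :=
  let acc := "<tr class=\"" ++ lang.2.2 ++ "\"><td class=\"left-column\">"
  let acc := acc ++ (if lang.2.2 == "N" then "&bigstar;" else "")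
  let acc := acc ++ "</td><td class=\"language\">" ++ lang.2.1 ++ "</td></tr>"
  acc

def pvHeaderPre : String := "<html>\n    <head>\n        <title>"
def pvHeaderPost : String := " speaks:</title>\n        <meta name=\"viewport\" content=\"width=device-width, initial-scale=1\">\n        <lnk rel=\"stylesheet\" type=\"text/css\" href=\"../styles.css\">\n    </head>\n\n    <body>\n        <table>\n"
def pvSep : String := "\n\n<tr class=\"border\"></td></td><td></td></tr>\n\n"
def pvFooter : String := "\n        </table>\n\n        <p>Key: <span class=\"fluent\">fluent</span>, \n        <span class=\"intermediate\">intermediate</span>, \n        <span class=\"beginner\">beginner</span>. Native\n        languages are starred (<span class=\"native\">&bigstar;</span>).</p>\n\n    </body>\n</html>\n"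

def genpage (user : String) (query : List (String × String × String)) : String :=
  let acc := pvHeaderPre ++ user ++ pvHeaderPost
  -- for level in ["N","C","B","A"]: blocks.append("\n".join([mkrow(l) for l in query if l[2] == level]))
  let blocks := (["N", "C", "B", "A"]).foldl
    (fun bs level => bs ++ [PySem.Str.join "\n" ((query.filter (fun l => l.2.2 == level)).map mkrow)]) []
  let acc := acc ++ PySem.Str.join pvSep blocks
  acc ++ pvFooter

-- ===== PORT B =====
def genpage_alt (user : String) (query : List (String × String × String)) : String :=
  let acc := pvHeaderPre ++ user ++ pvHeaderPost
  -- buckets.setdefault(l[2], []).append(l)  ==  buckets[l[2]] = buckets.get(l[2], []) + [l]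
  let buckets := query.foldl
    (fun (d : PySem.Dict String (List (String × String × String))) l =>
      d.modify l.2.2 [] (· ++ [l])) PySem.Dict.empty
  let acc := acc ++ PySem.Str.join pvSep
    ((["N", "C", "B", "A"]).map
      (fun level => PySem.Str.join "\n" ((buckets.getD level []).map mkrow)))
  acc ++ pvFooter

-- ===== PRECONDITION & SPEC =====
def Spec_genpage (user : String) (query : List (String × String × String)) (out : String) : Prop := out = genpage_alt user query
instance (user : String) (query : List (String × String × String)) (out : String) : Decidable (Spec_genpage user query out) := by unfold Spec_genpage; infer_instance

-- ===== CLAIM (what is proved, stated in full; the proofs are below) =====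
def Claim_equal_genpage : Prop := ∀ (user : String) (query : List (String × String × String)), Dom_genpage user query → Spec_genpage user query (genpage user query)

-- ===== LEMMAS AND PROOFS =====
theorem buckets_getD (q : List (String × String × String))
    (d : PySem.Dict String (List (String × String × String))) (c : String) :
    (q.foldl (fun d l => d.modify l.2.2 [] (· ++ [l])) d).getD c []
      = d.getD c [] ++ q.filter (fun l => l.2.2 == c) := by
  induction q generalizing d with
  | nil => simp
  | cons l q ih =>
    simp only [List.foldl_cons, List.filter_cons, ih, PySem.Dict.getD_modify]
    rcases eq_or_ne c l.2.2 with h | h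
    · subst h
      rw [if_pos rfl, if_pos (by simp)]
      simp
    · rw [if_neg h, if_neg (by simpa using fun e => h e.symm)]

-- ===== VERDICT (by name: the statement is the Claim_ definition above) =====
theorem genpage_spec : Claim_equal_genpage := by
  intro user query _
  show _ = _
  simp only [genpage, genpage_alt, List.foldl, List.map, buckets_getD]
  simp
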